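-- pv_equiv track=rewrite | github.com/MrBrantCode/unitest_baseline | mut_generate/mist_train_taco/taco_5460/solution.py | max_good_index_pairs
-- ===== SOURCE A (Python) =====
-- from math import gcd
--
-- def max_good_index_pairs(a):
--     """
--     Calculate the maximum number of good index pairs in the array `a` if it can be reordered in an arbitrary way.
--
--     A pair of indices (i, j) is considered good if 1 <= i < j <= n and gcd(a_i, 2 * a_j) > 1.
--
--     Parameters:
--     a (list of int): The array of integers.
--
--     Returns:
--     int: The maximum number of good index pairs.
--     """
--     res = 0
--     one = 0
--     even = 0
--     nums = []
--
--     # Separate the elements into different categories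
--     for num in a:
--         if num == 1:
--             one += 1
--         elif num % 2 == 0:
--             even += 1
--         else:
--             nums.append(num)
--
--     n = len(nums)
--
--     # Calculate pairs involving 1s and evens
--     res += one * even
--
--     # Calculate pairs involving evens and the rest of the numbers
--     res += even * n
--
--     # Calculate pairs among evens themselves
--     res += sum(range(even))
--
--     # Calculate pairs among the remaining numbers
--     while nums:
--         num = nums.pop()
--         res += len([1 for i in nums if gcd(num, i) > 1])
--
--     return res
-- ===== SOURCE B (Python) =====
-- from math import gcd
-- from collections import Counter
--
--
-- def max_good_index_pairs(a):
--     one = 0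
--     even = 0
--     cnt = Counter()
--     for x in a:
--         if x == 1:
--             one += 1
--         elif x % 2 == 0:
--             even += 1
--         else:
--             cnt[x] += 1
--     n = sum(cnt.values())
--     res = one * even + even * n + even * (even - 1) // 2
--     items = list(cnt.items())
--     for i, (u, cu) in enumerate(items):
--         if abs(u) > 1:
--             res += cu * (cu - 1) // 2
--         for v, cv in items[i + 1:]:
--             if gcd(u, v) > 1:
--                 res += cu * cv
--     return res
-- ===== Notes on version B (the rewrite author's own statement) =====
-- stated objective: alternative
-- what changed: B replaces A's destructive pop-loop over all positions of the odd numbers by a Counter grouping them by value, counting each gcd comparison once per pair of distinct values weighted by multiplicities, and replaces sum(range(even)) by the closed form even*(even-1)//2.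
import Mathlib
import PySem

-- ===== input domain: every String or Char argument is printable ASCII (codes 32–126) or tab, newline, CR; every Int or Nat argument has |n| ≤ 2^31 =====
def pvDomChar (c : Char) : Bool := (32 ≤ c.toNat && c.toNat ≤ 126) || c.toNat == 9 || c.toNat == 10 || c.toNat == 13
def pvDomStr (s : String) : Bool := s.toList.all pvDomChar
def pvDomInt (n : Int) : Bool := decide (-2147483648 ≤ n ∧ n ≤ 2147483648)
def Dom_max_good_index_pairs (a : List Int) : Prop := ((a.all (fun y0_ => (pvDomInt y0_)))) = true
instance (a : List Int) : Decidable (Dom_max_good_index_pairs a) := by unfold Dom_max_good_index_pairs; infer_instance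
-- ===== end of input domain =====

-- B groups the odd numbers by value (a Counter) and counts gcd-pairs once per pair of
-- DISTINCT values (weighted by multiplicities) instead of once per pair of positions;
-- closed form even*(even-1)//2 replaces sum(range(even)).  Objective: alternative.

-- ===== PORT A =====
-- 'while nums: num = nums.pop(); res += len([1 for i in nums if gcd(num, i) > 1])'
-- nums.pop() removes the LAST element = the head of the reversed list, the remaining
-- nums is t.reverse; called below on nums.reverse.
def pvPopLoopA : List Int → Int
  | [] => 0
  | x :: t => ((t.reverse.filter (fun i => decide (1 < Int.gcd x i))).length : Int) + pvPopLoopA t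

def max_good_index_pairs (a : List Int) : Int :=
  let s := a.foldl (fun (s : Int × Int × List Int) num =>
    if num == 1 then (s.1 + 1, s.2.1, s.2.2)
    else if PySem.Int.mod num 2 == 0 then (s.1, s.2.1 + 1, s.2.2)
    else (s.1, s.2.1, s.2.2 ++ [num])) (0, 0, ([] : List Int))
  let one := s.1
  let even := s.2.1
  let nums := s.2.2
  let n : Int := nums.length
  let res : Int := 0 + one * even + even * n + (PySem.List.pyRange 0 even 1).sum
  res + pvPopLoopA nums.reverse

-- ===== PORT B =====
-- inner loop 'for v, cv in items[i+1:]: if gcd(u, v) > 1: res += cu * cv', then the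
-- outer loop walks the items list (structural recursion = enumerate + tail slice).
def pvPairLoopB : List (Int × Int) → Int → Int
  | [], res => res
  | (u, cu) :: rest, res =>
    let res1 := if 1 < u.natAbs then res + PySem.Int.floordiv (cu * (cu - 1)) 2 else res
    let res2 := rest.foldl (fun r p => if 1 < Int.gcd u p.1 then r + cu * p.2 else r) res1
    pvPairLoopB rest res2

def max_good_index_pairs_alt (a : List Int) : Int :=
  let s := a.foldl (fun (s : Int × Int × PySem.Dict Int Int) x =>
    if x == 1 then (s.1 + 1, s.2.1, s.2.2)
    else if PySem.Int.mod x 2 == 0 then (s.1, s.2.1 + 1, s.2.2)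
    else (s.1, s.2.1, s.2.2.modify x 0 (· + 1))) (0, 0, PySem.Dict.empty)
  let one := s.1
  let even := s.2.1
  let cnt := s.2.2
  let n : Int := cnt.values.sum
  let res : Int := one * even + even * n + PySem.Int.floordiv (even * (even - 1)) 2
  pvPairLoopB cnt.items res

-- ===== PRECONDITION & SPEC =====
def Spec_max_good_index_pairs (a : List Int) (out : Int) : Prop := out = max_good_index_pairs_alt a
instance (a : List Int) (out : Int) : Decidable (Spec_max_good_index_pairs a out) := by unfold Spec_max_good_index_pairs; infer_instance

-- ===== CLAIM (what is proved, stated in full; the proofs are below) =====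
def Claim_equal_max_good_index_pairs : Prop := ∀ (a : List Int), Dom_max_good_index_pairs a → Spec_max_good_index_pairs a (max_good_index_pairs a)

-- ===== LEMMAS AND PROOFS =====

-- the two 'categorise a' loops, characterised
def pvOneP : Int → Bool := fun x => x == 1
def pvEvenP : Int → Bool := fun x => !(x == 1) && (PySem.Int.mod x 2 == 0)
def pvOddP : Int → Bool := fun x => !(x == 1) && !(PySem.Int.mod x 2 == 0)

lemma pv_foldA (a : List Int) (o e : Int) (ns : List Int) :
    a.foldl (fun (s : Int × Int × List Int) num =>
      if num == 1 then (s.1 + 1, s.2.1, s.2.2)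
      else if PySem.Int.mod num 2 == 0 then (s.1, s.2.1 + 1, s.2.2)
      else (s.1, s.2.1, s.2.2 ++ [num])) (o, e, ns)
    = (o + (a.countP pvOneP : Int), e + (a.countP pvEvenP : Int), ns ++ a.filter pvOddP) := by
  induction a generalizing o e ns with
  | nil => simp
  | cons x t ih =>
    rw [List.foldl_cons]
    by_cases h1 : x == 1
    · rw [if_pos h1, ih]
      simp only [List.countP_cons, List.filter_cons, pvOneP, pvEvenP, pvOddP, h1, Prod.mk.injEq]
      refine ⟨by push_cast; ring, by simp <;> omega, by simp⟩
    · by_cases h2 : PySem.Int.mod x 2 == 0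
      · rw [if_neg h1, if_pos h2, ih]
        simp only [List.countP_cons, List.filter_cons, pvOneP, pvEvenP, pvOddP, h1, h2, Prod.mk.injEq]
        refine ⟨by push_cast; ring, by simp <;> omega, by simp⟩
      · rw [if_neg h1, if_neg h2, ih]
        simp only [List.countP_cons, List.filter_cons, pvOneP, pvEvenP, pvOddP, h1, h2, Prod.mk.injEq]
        refine ⟨by push_cast; ring, by simp <;> omega, by simp⟩

lemma pv_foldB (a : List Int) (o e : Int) (d : PySem.Dict Int Int) :
    a.foldl (fun (s : Int × Int × PySem.Dict Int Int) x =>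
      if x == 1 then (s.1 + 1, s.2.1, s.2.2)
      else if PySem.Int.mod x 2 == 0 then (s.1, s.2.1 + 1, s.2.2)
      else (s.1, s.2.1, s.2.2.modify x 0 (· + 1))) (o, e, d)
    = (o + (a.countP pvOneP : Int), e + (a.countP pvEvenP : Int),
       (a.filter pvOddP).foldl (fun d x => d.modify x 0 (· + 1)) d) := by
  induction a generalizing o e d with
  | nil => simp
  | cons x t ih =>
    rw [List.foldl_cons]
    by_cases h1 : x == 1
    · rw [if_pos h1, ih]
      simp only [List.countP_cons, List.filter_cons, pvOneP, pvEvenP, pvOddP, h1, Prod.mk.injEq]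
      refine ⟨by push_cast; ring, by simp <;> omega, by simp⟩
    · by_cases h2 : PySem.Int.mod x 2 == 0
      · rw [if_neg h1, if_pos h2, ih]
        simp only [List.countP_cons, List.filter_cons, pvOneP, pvEvenP, pvOddP, h1, h2, Prod.mk.injEq]
        refine ⟨by push_cast; ring, by simp <;> omega, by simp⟩
      · rw [if_neg h1, if_neg h2, ih]
        simp only [List.countP_cons, List.filter_cons, pvOneP, pvEvenP, pvOddP, h1, h2, Prod.mk.injEq]
        refine ⟨by push_cast; ring, by simp <;> omega, by simp⟩

-- A's pop loop as a count over suffixes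
def pvP (u v : Int) : Bool := decide (1 < Int.gcd u v)

def pvPop : List Int → Nat
  | [] => 0
  | x :: t => t.countP (pvP x) + pvPop t

lemma pv_popLoopA_eq (l : List Int) : pvPopLoopA l = (pvPop l : Int) := by
  induction l with
  | nil => rfl
  | cons x t ih =>
    have hfn : (fun i => decide (1 < Int.gcd x i)) = pvP x := rfl
    simp [pvPopLoopA, pvPop, ih, List.countP_eq_length_filter, hfn]

lemma pv_pop_perm {l l' : List Int} (h : l.Perm l') : pvPop l = pvPop l' := by
  induction h with
  | nil => rfl
  | cons x _ ih => simp [pvPop, ih]; rw [List.Perm.countP_eq]; assumption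
  | swap x y t =>
    simp only [pvPop, List.countP_cons]
    have h : pvP y x = pvP x y := by simp [pvP, Int.gcd_comm]
    rw [h]
    omega
  | trans _ _ ih1 ih2 => omega

-- counting inside a replicate-block prefix
def pvTri : Nat → Nat
  | 0 => 0
  | m + 1 => m + pvTri m

lemma pv_pop_replicate (u : Int) (m : Nat) (rest : List Int) :
    pvPop (List.replicate m u ++ rest)
      = (if pvP u u then pvTri m else 0) + m * rest.countP (pvP u) + pvPop rest := by
  induction m with
  | zero => simp [pvTri]
  | succ k ih =>
    have : List.replicate (k + 1) u ++ rest = u :: (List.replicate k u ++ rest) := by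
      simp [List.replicate_succ]
    rw [this]
    simp only [pvPop, ih, List.countP_append, List.countP_replicate, pvTri]
    by_cases h : pvP u u <;> simp [h] <;> ring

lemma pv_tri_two (m : Nat) : 2 * pvTri m = m * (m - 1) := by
  induction m with
  | zero => rfl
  | succ k ih =>
    have h : (k + 1) * (k + 1 - 1) = k * (k - 1) + 2 * k := by
      cases k with
      | zero => rfl
      | succ j => simp only [Nat.add_sub_cancel]; ring
    simp only [pvTri]
    omega

lemma pv_tri_eq (m : Nat) : pvTri m = m * (m - 1) / 2 := by
  have := pv_tri_two m
  omega

lemma pv_tri_int (m : Nat) :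
    (pvTri m : Int) = PySem.Int.floordiv ((m : Int) * ((m : Int) - 1)) 2 := by
  cases m with
  | zero => simp [pvTri, PySem.Int.floordiv]
  | succ k =>
    rw [pv_tri_eq]
    simp only [Nat.add_sub_cancel]
    have h1 : ((k + 1 : Nat) : Int) * (((k + 1 : Nat) : Int) - 1) = (((k + 1) * k : Nat) : Int) := by
      push_cast; ring
    rw [h1]
    exact_mod_cast (PySem.Int.floordiv_natCast ((k + 1) * k) 2).symm

-- expansion of a (value, multiplicity) list back into a flat list
def pvExpand (items : List (Int × Int)) : List Int :=
  items.flatMap (fun q => List.replicate q.2.toNat q.1)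

lemma pv_countP_expand (p : Int → Bool) (items : List (Int × Int)) :
    (pvExpand items).countP p = (items.map (fun q => if p q.1 then q.2.toNat else 0)).sum := by
  induction items with
  | nil => rfl
  | cons q rest ih =>
    rw [show pvExpand (q :: rest) = List.replicate q.2.toNat q.1 ++ pvExpand rest from rfl]
    simp [List.countP_append, List.countP_replicate, ih]

-- B's grouped sum, accumulator-free
def pvGsum : List (Int × Int) → Int
  | [] => 0
  | (u, cu) :: rest =>
    (if 1 < u.natAbs then PySem.Int.floordiv (cu * (cu - 1)) 2 else 0)
    + (rest.map (fun q => if 1 < Int.gcd u q.1 then cu * q.2 else 0)).sum + pvGsum rest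

lemma pv_pairLoopB_eq (items : List (Int × Int)) (res : Int) :
    pvPairLoopB items res = res + pvGsum items := by
  induction items generalizing res with
  | nil => simp [pvPairLoopB, pvGsum]
  | cons q rest ih =>
    obtain ⟨u, cu⟩ := q
    simp only [pvPairLoopB, pvGsum]
    rw [ih]
    have : ∀ (r : Int),
        rest.foldl (fun r p => if 1 < Int.gcd u p.1 then r + cu * p.2 else r) r
          = r + (rest.map (fun q => if 1 < Int.gcd u q.1 then cu * q.2 else 0)).sum := by
      intro r
      have hc : rest.foldl (fun r p => if 1 < Int.gcd u p.1 then r + cu * p.2 else r) r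
          = rest.foldl (fun r p => r + (if 1 < Int.gcd u p.1 then cu * p.2 else 0)) r := by
        apply PySem.List.foldl_congr_mem
        intro acc x _
        by_cases h : 1 < Int.gcd u x.1 <;> simp [h]
      rw [hc, PySem.List.foldl_add]
    by_cases h : 1 < u.natAbs <;> simp [h, this] <;> ring

lemma pv_weighted_sum (u cu : Int) (rest : List (Int × Int)) (h : ∀ q ∈ rest, 0 ≤ q.2) :
    cu * ((((rest.map (fun q => if pvP u q.1 then q.2.toNat else (0 : Nat))).sum : Nat)) : Int)
      = (rest.map (fun q => if 1 < Int.gcd u q.1 then cu * q.2 else 0)).sum := by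
  induction rest with
  | nil => simp
  | cons r t ih =>
    have h0 : (0 : Int) ≤ r.2 := h r (by simp)
    have ht : ∀ q ∈ t, 0 ≤ q.2 := fun q hq => h q (by simp [hq])
    simp only [List.map_cons, List.sum_cons]
    rw [Nat.cast_add, mul_add, ih ht]
    congr 1
    by_cases hg : 1 < Int.gcd u r.1
    · simp [pvP, hg, Int.toNat_of_nonneg h0]
    · simp [pvP, hg]

lemma pv_pop_expand (items : List (Int × Int)) (hpos : ∀ q ∈ items, 1 ≤ q.2) :
    (pvPop (pvExpand items) : Int) = pvGsum items := by
  induction items with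
  | nil => simp [pvExpand, pvPop, pvGsum]
  | cons q rest ih =>
    obtain ⟨u, cu⟩ := q
    have hcu : 1 ≤ cu := hpos (u, cu) (by simp)
    have hrest : ∀ q ∈ rest, 1 ≤ q.2 := fun q hq => hpos q (by simp [hq])
    have hrest0 : ∀ q ∈ rest, 0 ≤ q.2 := fun q hq => le_of_lt (lt_of_lt_of_le zero_lt_one (hrest q hq))
    have hcast : ((cu.toNat : Int)) = cu := Int.toNat_of_nonneg (by omega)
    have hexp : pvExpand ((u, cu) :: rest) = List.replicate cu.toNat u ++ pvExpand rest := by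
      simp [pvExpand]
    rw [hexp, pv_pop_replicate, Nat.cast_add, Nat.cast_add, ih hrest, pv_countP_expand,
        Nat.cast_mul, hcast, pv_weighted_sum u cu rest hrest0]
    have htri := pv_tri_int cu.toNat
    rw [hcast] at htri
    have hg : ((if pvP u u then pvTri cu.toNat else 0 : Nat) : Int)
        = (if 1 < u.natAbs then PySem.Int.floordiv (cu * (cu - 1)) 2 else 0) := by
      by_cases hU : 1 < u.natAbs
      · simp [pvP, Int.gcd_self, hU, htri]
      · simp [pvP, Int.gcd_self, hU]
    rw [hg]
    simp only [pvGsum]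

lemma pv_count_flatMap_replicate (nums : List Int) (S : List Int) (hnd : S.Nodup) (v : Int) :
    (S.flatMap (fun k => List.replicate (nums.count k) k)).count v
      = if v ∈ S then nums.count v else 0 := by
  induction S with
  | nil => simp
  | cons k rest ih =>
    have hnd' : rest.Nodup := hnd.of_cons
    have hk : k ∉ rest := by simp [List.nodup_cons] at hnd; exact hnd.1
    simp only [List.flatMap_cons, List.count_append, ih hnd', List.count_replicate]
    by_cases hv : v = k
    · subst hv
      simp [hk]
    · simp [hv, Ne.symm hv, List.mem_cons]

lemma pv_perm_expand_counter (nums : List Int) :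
    nums.Perm (pvExpand ((PySem.Dict.counter nums).items)) := by
  rw [List.perm_iff_count]
  intro v
  have hitems := PySem.Dict.items_counter nums
  have hexp : pvExpand ((PySem.Dict.counter nums).items)
      = (PySem.Set.ofList nums).flatMap (fun k => List.replicate (nums.count k) k) := by
    rw [hitems]
    simp [pvExpand, List.flatMap_map]
  rw [hexp, pv_count_flatMap_replicate nums _ (PySem.Set.nodup_ofList nums) v]
  by_cases hv : v ∈ nums
  · simp [(PySem.Set.mem_ofList nums v).mpr hv]
  · have : v ∉ PySem.Set.ofList nums := fun h => hv ((PySem.Set.mem_ofList nums v).mp h)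
    simp [this, List.count_eq_zero_of_not_mem hv]

lemma pv_counter_pos (nums : List Int) :
    ∀ q ∈ (PySem.Dict.counter nums).items, 1 ≤ q.2 := by
  intro q hq
  rw [PySem.Dict.items_counter] at hq
  obtain ⟨k, hk, rfl⟩ := List.mem_map.mp hq
  have : k ∈ nums := (PySem.Set.mem_ofList nums k).mp hk
  have := List.count_pos_iff.mpr this
  simp
  omega

lemma pv_values_sum (nums : List Int) :
    (PySem.Dict.counter nums).values.sum = (nums.length : Int) := by
  have hlen : nums.length = (pvExpand ((PySem.Dict.counter nums).items)).length :=
    (pv_perm_expand_counter nums).length_eq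
  have hitems := PySem.Dict.items_counter nums
  simp only [PySem.Dict.values, hitems, List.map_map]
  rw [hlen, hitems]
  simp only [pvExpand, List.flatMap_map, List.length_flatMap]
  induction (PySem.Set.ofList nums) with
  | nil => simp
  | cons k rest ih =>
    simp only [List.map_cons, List.sum_cons, ih]
    push_cast
    simp [Function.comp]

-- Gauss for A's sum(range(even))
lemma pv_range_sum (m : Nat) : (PySem.List.pyRange 0 (m : Int) 1).sum = (pvTri m : Int) := by
  induction m with
  | zero => rfl
  | succ k ih =>
    have : ((k + 1 : Nat) : Int) = (k : Int) + 1 := by push_cast; ring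
    rw [this, PySem.List.pyRange_one_succ_right (by positivity), List.sum_append]
    simp [ih, pvTri]
    ring

-- ===== VERDICT (by name: the statement is the Claim_ definition above) =====
theorem max_good_index_pairs_spec : Claim_equal_max_good_index_pairs := by
  intro a _
  unfold Spec_max_good_index_pairs max_good_index_pairs max_good_index_pairs_alt
  simp only [pv_foldA, pv_foldB, zero_add, List.nil_append]
  set c1 := a.countP pvOneP with hc1
  set c2 := a.countP pvEvenP with hc2
  set nums := a.filter pvOddP with hnums
  rw [← PySem.Dict.counter_eq_foldl, pv_popLoopA_eq, pv_pairLoopB_eq, pv_values_sum,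
      pv_range_sum, pv_tri_int]
  rw [pv_pop_perm ((nums.reverse_perm).trans (pv_perm_expand_counter nums)),
      pv_pop_expand _ (pv_counter_pos nums)]
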